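-- pv_equiv track=rewrite | github.com/bermau/text_extractor | lib_logstudy.py | get_imposer_marques
-- ===== SOURCE A (Python) =====
-- def get_imposer_marques(ligne='', positions=None, longueur=0):
--     """Renvoie la ligne 1 mise à la longueur et en remplaçant les caractères situés à la liste
--      de positions par un caractère |
--      ????
--      """
--     if positions is None:
--         positions = []
--     ligne = ligne.ljust(longueur)
--     ligne_out = ''
--     for i in range(len(ligne)):
--         if i in positions:
--             ligne_out = ligne_out + '|'
--         else:
--             ligne_out = ligne_out + ligne[i]
--     return ligne_out
-- ===== SOURCE B (Python) =====
-- def get_imposer_marques(ligne='', positions=None, longueur=0):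
--     cars = list(ligne.ljust(longueur))
--     n = len(cars)
--     for p in (positions if positions is not None else []):
--         if 0 <= p < n:
--             cars[p] = '|'
--     return ''.join(cars)
-- ===== Notes on version B (the rewrite author's own statement) =====
-- stated objective: faster
-- what changed: Instead of scanning every index of the padded line and testing membership in positions (with quadratic string concatenation), B builds a mutable character list of the padded line once and loops only over positions, writing the mark into each in-range slot.
import Mathlib
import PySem

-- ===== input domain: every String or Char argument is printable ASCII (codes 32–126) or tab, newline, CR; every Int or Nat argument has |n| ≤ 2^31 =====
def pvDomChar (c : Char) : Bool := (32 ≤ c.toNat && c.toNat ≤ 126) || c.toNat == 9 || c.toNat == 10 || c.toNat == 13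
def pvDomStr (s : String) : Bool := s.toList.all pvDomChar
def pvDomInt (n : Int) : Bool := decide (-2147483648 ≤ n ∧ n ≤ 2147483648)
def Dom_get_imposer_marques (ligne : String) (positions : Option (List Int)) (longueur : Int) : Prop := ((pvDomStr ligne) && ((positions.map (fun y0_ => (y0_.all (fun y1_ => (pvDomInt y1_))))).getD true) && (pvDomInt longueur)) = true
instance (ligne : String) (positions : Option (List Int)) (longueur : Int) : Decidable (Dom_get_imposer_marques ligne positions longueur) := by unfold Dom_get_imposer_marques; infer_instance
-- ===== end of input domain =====

-- B builds the padded char list once and writes '|' only at the in-range positions,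
-- instead of A's per-index membership scan with string concatenation.

-- ===== PORT A =====
-- ligne.ljust(longueur): pad on the right with spaces up to longueur (no-op if shorter)
def pvLjust (s : List Char) (longueur : Int) : List Char :=
  s ++ List.replicate (longueur - (s.length : Int)).toNat ' '

def get_imposer_marques (ligne : String) (positions : Option (List Int)) (longueur : Int) : String :=
  let positions := positions.getD []
  let l := pvLjust ligne.toList longueur
  let out := (PySem.List.pyRange 0 (l.length : Int) 1).foldl
    (fun acc i => if i ∈ positions then acc ++ ['|'] else acc ++ [PySem.List.pyGetD l i ' ']) []
  String.ofList out

-- ===== PORT B =====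
def get_imposer_marques_alt (ligne : String) (positions : Option (List Int)) (longueur : Int) : String :=
  let cars := pvLjust ligne.toList longueur
  let n := cars.length
  let res := (positions.getD []).foldl
    (fun l p => if 0 ≤ p ∧ p < (n : Int) then l.set p.toNat '|' else l) cars
  String.ofList res

-- ===== PRECONDITION & SPEC =====
def Spec_get_imposer_marques (ligne : String) (positions : Option (List Int)) (longueur : Int) (out : String) : Prop := out = get_imposer_marques_alt ligne positions longueur
instance (ligne : String) (positions : Option (List Int)) (longueur : Int) (out : String) : Decidable (Spec_get_imposer_marques ligne positions longueur out) := by unfold Spec_get_imposer_marques; infer_instance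

-- ===== CLAIM (what is proved, stated in full; the proofs are below) =====
def Claim_equal_get_imposer_marques : Prop := ∀ (ligne : String) (positions : Option (List Int)) (longueur : Int), Dom_get_imposer_marques ligne positions longueur → Spec_get_imposer_marques ligne positions longueur (get_imposer_marques ligne positions longueur)

-- ===== LEMMAS AND PROOFS =====

theorem bFold_length (ps : List Int) (n : Nat) (l : List Char) :
    (ps.foldl (fun l p => if 0 ≤ p ∧ p < (n : Int) then l.set p.toNat '|' else l) l).length
      = l.length := by
  induction ps generalizing l with
  | nil => rfl
  | cons p ps ih =>
      simp only [List.foldl_cons]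
      rw [ih]
      split <;> simp

theorem bFold_getElem (ps : List Int) (n : Nat) (l : List Char) (hl : l.length = n)
    (i : Nat) (hi : i < l.length)
    (hfin : i < (ps.foldl (fun l p => if 0 ≤ p ∧ p < (n : Int) then l.set p.toNat '|' else l) l).length) :
    (ps.foldl (fun l p => if 0 ≤ p ∧ p < (n : Int) then l.set p.toNat '|' else l) l)[i]
      = if (i : Int) ∈ ps then '|' else l[i] := by
  induction ps generalizing l with
  | nil => simp
  | cons p ps ih =>
      simp only [List.foldl_cons] at hfin ⊢
      have hlen : (if 0 ≤ p ∧ p < (n : Int) then l.set p.toNat '|' else l).length = l.length := by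
        split <;> simp
      rw [ih _ (by rw [hlen, hl]) (by rw [hlen]; exact hi) hfin]
      by_cases hmem : (i : Int) ∈ ps
      · simp [hmem]
      · simp only [hmem, if_false]
        by_cases hp : 0 ≤ p ∧ p < (n : Int)
        · simp only [hp, and_self, if_true]
          by_cases hpi : p = (i : Int)
          · simp [hpi, List.mem_cons]
          · have hne : p.toNat ≠ i := by omega
            have hip : ((i : Int)) ≠ p := fun h => hpi h.symm
            rw [List.getElem_set_ne hne]
            simp [List.mem_cons, hmem, hip]
        · simp only [hp, if_false]
          have hip : ((i : Int)) ≠ p := by omega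
          simp [List.mem_cons, hmem, hip]

theorem aFold_eq_map (ps : List Int) (l : List Char) :
    ((PySem.List.pyRange 0 (l.length : Int) 1).foldl
      (fun acc i => if i ∈ ps then acc ++ ['|'] else acc ++ [PySem.List.pyGetD l i ' ']) [])
    = (PySem.List.pyRange 0 (l.length : Int) 1).map
      (fun i => if i ∈ ps then '|' else PySem.List.pyGetD l i ' ') := by
  have hfun : (fun (acc : List Char) (i : Int) => if i ∈ ps then acc ++ ['|'] else acc ++ [PySem.List.pyGetD l i ' '])
      = (fun acc i => acc ++ [if i ∈ ps then '|' else PySem.List.pyGetD l i ' ']) := by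
    funext acc i; split <;> rfl
  rw [hfun, PySem.List.foldl_append_singleton_eq_map]
  simp only [List.nil_append]

-- ===== VERDICT (by name: the statement is the Claim_ definition above) =====
theorem get_imposer_marques_spec : Claim_equal_get_imposer_marques := by
  intro ligne positions longueur _
  unfold Spec_get_imposer_marques get_imposer_marques get_imposer_marques_alt
  set ps := positions.getD [] with hps
  set l := pvLjust ligne.toList longueur with hlval
  simp only []
  congr 1
  rw [aFold_eq_map]
  apply List.ext_getElem
  · simp [bFold_length, PySem.List.length_pyRange_one]
  · intro i h1 h2
    have hi : i < l.length := by
      simpa [PySem.List.length_pyRange_one] using h1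
    rw [bFold_getElem ps l.length l rfl i hi h2]
    rw [List.getElem_map]
    have hpr : i < (PySem.List.pyRange 0 (l.length : Int) 1).length := by
      simpa [PySem.List.length_pyRange_one] using hi
    have hidx : (PySem.List.pyRange 0 (l.length : Int) 1)[i]'hpr = (i : Int) := by
      rw [PySem.List.getElem_pyRange_one]; simp
    rw [hidx]
    congr 1
    rw [PySem.List.pyGetD_natCast]
    exact List.getD_eq_getElem l ' ' hi
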